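-- pv_equiv track=rewrite | github.com/AmauryLiet/CodeJam | 2020/0_qualif/4.py | get_best_distinguishing_byte
-- ===== SOURCE A (Python) =====
-- def get_best_distinguishing_byte(_possible_results):
--     min_excluded_results = 0
--     byte_for_best_result = 0
--     for byte in range(len(_possible_results[0])):
--         count_0 = sum(r[byte] == 0 for r in _possible_results)
--         count_1 = sum(r[byte] == 1 for r in _possible_results)
--         if max(count_0, count_1) and min(count_0, count_1) > min_excluded_results:
--             byte_for_best_result = byte
--             min_excluded_results = min(count_0, count_1)
--     # if min_excluded_results > 0:
--     return byte_for_best_result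
-- ===== SOURCE B (Python) =====
-- def get_best_distinguishing_byte(_possible_results):
--     # Phase 1: one pass over the rows, building a per-byte (count_0, count_1) table.
--     counts = [(0, 0)] * len(_possible_results[0])
--     for r in _possible_results:
--         counts = [(c0 + (r[b] == 0), c1 + (r[b] == 1))
--                   for b, (c0, c1) in enumerate(counts)]
--     # Phase 2: pick the first byte with strictly largest min(count_0, count_1).
--     best, best_byte = 0, 0
--     for b, (c0, c1) in enumerate(counts):
--         m = min(c0, c1)
--         if m > best:
--             best, best_byte = m, b
--     return best_byte
-- ===== Notes on version B (the rewrite author's own statement) =====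
-- stated objective: alternative
-- what changed: B builds a per-byte (count_0, count_1) table in one pass over the result rows and then selects the best byte in a second pass over that table, instead of re-scanning the whole row list twice for every byte as A does; Pre_ only excludes inputs where both A and B raise IndexError (empty input, or a row shorter than the first row).
import Mathlib
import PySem

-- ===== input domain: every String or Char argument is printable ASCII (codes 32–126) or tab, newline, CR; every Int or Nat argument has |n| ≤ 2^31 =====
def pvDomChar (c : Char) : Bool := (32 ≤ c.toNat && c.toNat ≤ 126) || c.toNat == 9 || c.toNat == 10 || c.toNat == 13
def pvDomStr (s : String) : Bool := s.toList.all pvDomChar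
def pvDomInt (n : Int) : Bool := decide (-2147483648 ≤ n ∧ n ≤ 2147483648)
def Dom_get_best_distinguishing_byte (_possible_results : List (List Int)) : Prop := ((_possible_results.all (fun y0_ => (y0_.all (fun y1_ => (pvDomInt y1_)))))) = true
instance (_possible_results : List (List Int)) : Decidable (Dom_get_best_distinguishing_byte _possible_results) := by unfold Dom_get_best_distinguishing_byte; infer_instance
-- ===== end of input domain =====

-- B replaces A's per-byte double re-scan of all rows by a count table built in one
-- pass over the rows followed by a selection pass over the table (objective: alternative).

-- ===== PORT A =====
def get_best_distinguishing_byte (_possible_results : List (List Int)) : Int :=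
  let st := (PySem.List.pyRange 0 ((PySem.List.pyGetD _possible_results 0 []).length : Int) 1).foldl
    (fun (st : Int × Int) byte =>
      let count_0 := (_possible_results.map
        (fun r => if PySem.List.pyGetD r byte 2 = 0 then (1 : Int) else 0)).sum
      let count_1 := (_possible_results.map
        (fun r => if PySem.List.pyGetD r byte 2 = 1 then (1 : Int) else 0)).sum
      if max count_0 count_1 ≠ 0 ∧ min count_0 count_1 > st.1 then
        (min count_0 count_1, byte)
      else st)
    ((0 : Int), (0 : Int))
  st.2

-- ===== PORT B =====
def get_best_distinguishing_byte_alt (_possible_results : List (List Int)) : Int :=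
  let counts := _possible_results.foldl
    (fun (cs : List (Int × Int)) r =>
      (PySem.List.enumerate cs 0).map (fun p =>
        (p.2.1 + (if PySem.List.pyGetD r p.1 2 = 0 then (1 : Int) else 0),
         p.2.2 + (if PySem.List.pyGetD r p.1 2 = 1 then (1 : Int) else 0))))
    (List.replicate (PySem.List.pyGetD _possible_results 0 []).length ((0 : Int), (0 : Int)))
  let st := (PySem.List.enumerate counts 0).foldl
    (fun (st : Int × Int) p =>
      if min p.2.1 p.2.2 > st.1 then (min p.2.1 p.2.2, p.1) else st)
    ((0 : Int), (0 : Int))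
  st.2

-- ===== PRECONDITION & SPEC =====
-- Pre_ excludes exactly the inputs where the Python A raises IndexError: the empty
-- list (A indexes _possible_results[0]) and inputs with a row shorter than the first
-- row (A indexes r[byte] for every byte below the first row's length). B raises there too.
def Pre_get_best_distinguishing_byte (_possible_results : List (List Int)) : Prop :=
  _possible_results ≠ [] ∧
    ∀ r ∈ _possible_results, (_possible_results.headD []).length ≤ r.length
instance (_possible_results : List (List Int)) : Decidable (Pre_get_best_distinguishing_byte _possible_results) := by unfold Pre_get_best_distinguishing_byte; infer_instance

def pvWitness_get_best_distinguishing_byte : List (List Int) := [[0, 1], [1, 1], [1, 0]]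

def Spec_get_best_distinguishing_byte (_possible_results : List (List Int)) (out : Int) : Prop := out = get_best_distinguishing_byte_alt _possible_results
instance (_possible_results : List (List Int)) (out : Int) : Decidable (Spec_get_best_distinguishing_byte _possible_results out) := by unfold Spec_get_best_distinguishing_byte; infer_instance

-- ===== CLAIM (what is proved, stated in full; the proofs are below) =====
def Claim_equal_get_best_distinguishing_byte : Prop := ∀ (_possible_results : List (List Int)), Dom_get_best_distinguishing_byte _possible_results → Pre_get_best_distinguishing_byte _possible_results → Spec_get_best_distinguishing_byte _possible_results (get_best_distinguishing_byte _possible_results)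

-- ===== LEMMAS AND PROOFS =====

-- number of rows of l whose entry at byte b equals v (the summand both programs use)
def pvCnt (l : List (List Int)) (v : Int) (b : Nat) : Int :=
  (l.map (fun r => if r.getD b 2 = v then (1 : Int) else 0)).sum

theorem pvCnt_nil (v : Int) (b : Nat) : pvCnt [] v b = 0 := rfl

theorem pvCnt_cons (r : List Int) (l : List (List Int)) (v : Int) (b : Nat) :
    pvCnt (r :: l) v b = (if r.getD b 2 = v then (1 : Int) else 0) + pvCnt l v b := by
  simp [pvCnt]

theorem pvCnt_nonneg (l : List (List Int)) (v : Int) (b : Nat) : 0 ≤ pvCnt l v b := by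
  induction l with
  | nil => simp [pvCnt]
  | cons r l ih => rw [pvCnt_cons]; split <;> omega

theorem pv_enumerate_append {α : Type} (xs ys : List α) (s : Int) :
    PySem.List.enumerate (xs ++ ys) s
      = PySem.List.enumerate xs s ++ PySem.List.enumerate ys (s + xs.length) := by
  induction xs generalizing s with
  | nil => simp [PySem.List.enumerate_nil]
  | cons x xs ih =>
      simp [PySem.List.enumerate_cons, ih]; ring_nf

theorem pv_enumerate_map_range {α : Type} (n : Nat) (f : Nat → α) :
    PySem.List.enumerate ((List.range n).map f) 0
      = (List.range n).map (fun (b : Nat) => ((b : Int), f b)) := by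
  induction n with
  | zero => simp [PySem.List.enumerate_nil]
  | succ n ih =>
      simp [List.range_succ, pv_enumerate_append, ih, PySem.List.enumerate_cons,
        PySem.List.enumerate_nil]

-- the count-table fold of B, characterised on tables of shape (range n).map f
theorem pv_fold_tbl (l : List (List Int)) (n : Nat) :
    ∀ f : Nat → Int × Int,
    l.foldl
      (fun (cs : List (Int × Int)) r =>
        (PySem.List.enumerate cs 0).map (fun p =>
          (p.2.1 + (if PySem.List.pyGetD r p.1 2 = 0 then (1 : Int) else 0),
           p.2.2 + (if PySem.List.pyGetD r p.1 2 = 1 then (1 : Int) else 0))))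
      ((List.range n).map f)
      = (List.range n).map
          (fun b => ((f b).1 + pvCnt l 0 b, (f b).2 + pvCnt l 1 b)) := by
  induction l with
  | nil => intro f; simp [pvCnt_nil]
  | cons r l ih =>
      intro f
      rw [List.foldl_cons]
      have hstep :
          (PySem.List.enumerate ((List.range n).map f) 0).map (fun p =>
            (p.2.1 + (if PySem.List.pyGetD r p.1 2 = 0 then (1 : Int) else 0),
             p.2.2 + (if PySem.List.pyGetD r p.1 2 = 1 then (1 : Int) else 0)))
            = (List.range n).map (fun b =>
                ((f b).1 + (if r.getD b 2 = 0 then (1 : Int) else 0),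
                 (f b).2 + (if r.getD b 2 = 1 then (1 : Int) else 0))) := by
        rw [pv_enumerate_map_range, List.map_map]
        refine List.map_congr_left (fun b _ => ?_)
        simp [PySem.List.pyGetD_natCast]
      rw [hstep, ih]
      refine List.map_congr_left (fun b _ => ?_)
      simp [pvCnt_cons]; constructor <;> ring

-- the two selection folds agree as long as the running best is nonnegative
theorem pv_sel (bs : List Nat) (c0 c1 : Nat → Int)
    (h0 : ∀ b, 0 ≤ c0 b) (h1 : ∀ b, 0 ≤ c1 b) :
    ∀ st : Int × Int, 0 ≤ st.1 →
    bs.foldl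
      (fun (st : Int × Int) b =>
        if max (c0 b) (c1 b) ≠ 0 ∧ min (c0 b) (c1 b) > st.1 then
          (min (c0 b) (c1 b), (b : Int))
        else st) st
      = bs.foldl
      (fun (st : Int × Int) b =>
        if min (c0 b) (c1 b) > st.1 then (min (c0 b) (c1 b), (b : Int)) else st) st := by
  induction bs with
  | nil => intro st _; rfl
  | cons b bs ih =>
      intro st hst
      rw [List.foldl_cons, List.foldl_cons]
      by_cases h : min (c0 b) (c1 b) > st.1
      · have hmax : max (c0 b) (c1 b) ≠ 0 := by
          have := h0 b; have := h1 b
          simp only [lt_min_iff] at h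
          intro hc; rw [max_eq_iff] at hc; omega
        rw [if_pos ⟨hmax, h⟩, if_pos h]
        exact ih _ (by have := h0 b; have := h1 b; simp only [le_min_iff]; omega)
      · rw [if_neg (fun hc => h hc.2), if_neg h]
        exact ih _ hst

-- ===== VERDICT (by name: the statement is the Claim_ definition above) =====
theorem get_best_distinguishing_byte_spec : Claim_equal_get_best_distinguishing_byte := by
  intro xs _ _
  unfold Spec_get_best_distinguishing_byte
  have hA : get_best_distinguishing_byte xs
      = ((List.range (PySem.List.pyGetD xs 0 []).length).foldl
          (fun (st : Int × Int) b =>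
            if max (pvCnt xs 0 b) (pvCnt xs 1 b) ≠ 0 ∧ min (pvCnt xs 0 b) (pvCnt xs 1 b) > st.1 then
              (min (pvCnt xs 0 b) (pvCnt xs 1 b), (b : Int))
            else st) ((0 : Int), (0 : Int))).2 := by
    unfold get_best_distinguishing_byte
    rw [PySem.List.pyRange_one, List.foldl_map]
    simp [pvCnt, PySem.List.pyGetD_natCast]
  have hB : get_best_distinguishing_byte_alt xs
      = ((List.range (PySem.List.pyGetD xs 0 []).length).foldl
          (fun (st : Int × Int) b =>
            if min (pvCnt xs 0 b) (pvCnt xs 1 b) > st.1 then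
              (min (pvCnt xs 0 b) (pvCnt xs 1 b), (b : Int))
            else st) ((0 : Int), (0 : Int))).2 := by
    unfold get_best_distinguishing_byte_alt
    rw [show List.replicate (PySem.List.pyGetD xs 0 []).length ((0 : Int), (0 : Int))
          = (List.range (PySem.List.pyGetD xs 0 []).length).map (fun _ => ((0 : Int), (0 : Int))) by
        simp]
    simp only [pv_fold_tbl xs, pv_enumerate_map_range, List.foldl_map]
    simp
  rw [hA, hB]
  exact congrArg Prod.snd
    (pv_sel (List.range (PySem.List.pyGetD xs 0 []).length) (pvCnt xs 0) (pvCnt xs 1)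
      (pvCnt_nonneg xs 0) (pvCnt_nonneg xs 1) ((0 : Int), (0 : Int)) le_rfl)
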